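-- pv_equiv track=rewrite | github.com/TNTtato/python_projects | sudoku/verifySudoku.py | convToList
-- ===== SOURCE A (Python) =====
-- def convToList(arrSudoku):
--     tempRow = ''
--     sudoku = []
--     for el in arrSudoku:
--         if el.isdigit():
--             tempRow += el
--         else:
--             sudoku.append(list(tempRow))
--             tempRow = ''
--     sudoku.append(list(tempRow))
--     return sudoku
-- ===== SOURCE B (Python) =====
-- import re
--
-- def convToList(arrSudoku):
--     return [list(seg) for seg in re.split(r'\D', arrSudoku)]
-- ===== Notes on version B (the rewrite author's own statement) =====
-- stated objective: idiomatic
-- what changed: Replaces A's stateful accumulate-and-flush character loop with a single re.split on non-digit characters followed by a list() comprehension over the segments.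
import Mathlib
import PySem

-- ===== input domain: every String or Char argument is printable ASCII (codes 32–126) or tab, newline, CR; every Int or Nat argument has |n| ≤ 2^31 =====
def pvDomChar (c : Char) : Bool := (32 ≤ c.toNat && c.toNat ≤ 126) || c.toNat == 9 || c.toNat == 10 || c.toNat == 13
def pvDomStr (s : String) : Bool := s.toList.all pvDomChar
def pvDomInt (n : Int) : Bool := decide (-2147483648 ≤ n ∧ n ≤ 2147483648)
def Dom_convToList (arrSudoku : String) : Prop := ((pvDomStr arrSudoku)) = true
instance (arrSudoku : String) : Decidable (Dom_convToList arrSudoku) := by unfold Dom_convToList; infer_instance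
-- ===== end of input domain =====

-- B replaces A's accumulate-and-flush character loop by split-on-non-digit then a map (idiomatic; same return value).

-- ===== PORT A =====
-- A's loop: accumulate digit chars in tempRow, flush (as a list of 1-char strings) on each
-- non-digit, final flush at the end; ported as structural recursion over the same state.
def convToListGo (tempRow : List Char) : List Char → List (List String)
  | [] => [tempRow.map (fun c => String.mk [c])]
  | c :: rest =>
    if PySem.Chars.isdigit c then
      convToListGo (tempRow ++ [c]) rest
    else
      tempRow.map (fun c => String.mk [c]) :: convToListGo [] rest

def convToList (arrSudoku : String) : List (List String) :=
  convToListGo [] arrSudoku.toList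

-- ===== PORT B =====
-- Source B: re.split(r'\D', s) — split on every single non-digit char, keeping empty segments —
-- ported by hand (exact for this single-char-class pattern); then list(seg) as a map.
def convToListSplit : List Char → List Char × List (List Char)
  | [] => ([], [])
  | c :: rest =>
    let r := convToListSplit rest
    if PySem.Chars.isdigit c then (c :: r.1, r.2) else ([], r.1 :: r.2)

def convToList_alt (arrSudoku : String) : List (List String) :=
  let r := convToListSplit arrSudoku.toList
  (r.1 :: r.2).map (fun seg => seg.map (fun c => String.mk [c]))

-- ===== PRECONDITION & SPEC =====
def Spec_convToList (arrSudoku : String) (out : List (List String)) : Prop := out = convToList_alt arrSudoku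
instance (arrSudoku : String) (out : List (List String)) : Decidable (Spec_convToList arrSudoku out) := by unfold Spec_convToList; infer_instance

-- ===== CLAIM (what is proved, stated in full; the proofs are below) =====
def Claim_equal_convToList : Prop := ∀ (arrSudoku : String), Dom_convToList arrSudoku → Spec_convToList arrSudoku (convToList arrSudoku)

-- ===== LEMMAS AND PROOFS =====
theorem convToListGo_eq_split (l : List Char) : ∀ acc : List Char,
    convToListGo acc l =
      ((acc ++ (convToListSplit l).1) :: (convToListSplit l).2).map
        (fun seg => seg.map (fun c => String.mk [c])) := by
  induction l with
  | nil => intro acc; simp [convToListGo, convToListSplit]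
  | cons c rest ih =>
    intro acc
    by_cases h : PySem.Chars.isdigit c = true
    · simp [convToListGo, convToListSplit, h, ih]
    · simp [convToListGo, convToListSplit, h, ih []]

-- ===== VERDICT (by name: the statement is the Claim_ definition above) =====
theorem convToList_spec : Claim_equal_convToList := by
  intro s _
  show convToList s = convToList_alt s
  simp [convToList, convToList_alt, convToListGo_eq_split]
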